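-- pv_equiv track=rewrite | github.com/bangtugu/Algorithm | BAEKJOON/18869_멀티버스_II.py | convert
-- ===== SOURCE A (Python) =====
-- def convert(lst):
--     sorted_lst = sorted(list(set(lst)))
--     dic = {}
--
--     for i in range(len(sorted_lst)):
--         dic[sorted_lst[i]] = i+1
--
--     for i in range(len(lst)):
--         lst[i] = dic[lst[i]]
--
--     return str(lst)
-- ===== SOURCE B (Python) =====
-- def convert(lst):
--     # Coordinate compression: rank of x = 1 + (number of distinct values < x),
--     # found by binary search in the sorted unique values (no rank dictionary).
--     sorted_unique = sorted(set(lst))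
--     for i in range(len(lst)):
--         x = lst[i]
--         lo, hi = 0, len(sorted_unique)
--         while lo < hi:
--             mid = (lo + hi) // 2
--             if sorted_unique[mid] < x:
--                 lo = mid + 1
--             else:
--                 hi = mid
--         lst[i] = lo + 1
--     return str(lst)
-- ===== Notes on version B (the rewrite author's own statement) =====
-- stated objective: alternative
-- what changed: Replaces A's rank dictionary (a separate dict-building pass over the sorted unique values, then hash lookups) with a hand-written binary search into the sorted unique values, so the dict-construction loop disappears entirely.
import Mathlib
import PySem

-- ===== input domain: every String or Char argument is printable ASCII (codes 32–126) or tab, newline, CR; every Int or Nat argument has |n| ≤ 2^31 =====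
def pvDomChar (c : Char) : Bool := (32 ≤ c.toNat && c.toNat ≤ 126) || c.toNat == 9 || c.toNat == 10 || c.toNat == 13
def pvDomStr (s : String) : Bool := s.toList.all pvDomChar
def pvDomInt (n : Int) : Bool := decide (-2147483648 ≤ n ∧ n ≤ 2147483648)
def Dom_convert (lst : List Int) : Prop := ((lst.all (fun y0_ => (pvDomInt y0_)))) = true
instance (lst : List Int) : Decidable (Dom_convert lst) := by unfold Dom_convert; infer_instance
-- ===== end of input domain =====

-- B replaces A's rank dictionary with a hand-written binary search into the sorted unique
-- values (the dict-building pass disappears); same cost class. Both Pythons assign the ranks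
-- into lst in place; the equivalence proved here is about the RETURN value str(lst).

-- shared helper: str(lst) for a list of ints, e.g. "[1, 2, 3]" / "[]"
def pyListStr (xs : List Int) : String :=
  "[" ++ PySem.Str.join ", " (xs.map PySem.Int.toStr) ++ "]"

-- ===== PORT A =====
def convert (lst : List Int) : String :=
  let sorted_lst := PySem.List.sorted (PySem.Set.ofList lst) (fun x => x) false
  let dic := (PySem.List.pyRange 0 (sorted_lst.length : Int) 1).foldl
      (fun d i => d.insert (PySem.List.pyGetD sorted_lst i 0) (i + 1)) PySem.Dict.empty
  -- dic[lst[i]]: the key lst[i] is always present in dic (it holds every element of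
  -- set(lst)), so Python never raises KeyError here and getD's default 0 is never used
  let out := (PySem.List.pyRange 0 (lst.length : Int) 1).foldl
      (fun acc i => acc ++ [dic.getD (PySem.List.pyGetD lst i 0) 0]) []
  pyListStr out

-- ===== PORT B =====
-- midpoint bounds for the binary-search step (used by bsearchLoop's termination proof)
theorem pv_mid_bounds (lo hi : Int) (h : lo < hi) :
    lo ≤ PySem.Int.floordiv (lo + hi) 2 ∧ PySem.Int.floordiv (lo + hi) 2 < hi :=
  ⟨(PySem.Int.le_floordiv_iff_mul_le (by norm_num)).mpr (by omega),
   (PySem.Int.floordiv_lt_iff_lt_mul (by norm_num)).mpr (by omega)⟩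

-- the while loop 'while lo < hi: mid = (lo+hi)//2; …' of Source B, step for step;
-- sorted_unique[mid] is always in range (0 ≤ lo ≤ mid < hi ≤ len), so pyGetD's default 0 is never used
def bsearchLoop (s : List Int) (x lo hi : Int) : Int :=
  if h : lo < hi then
    let mid := PySem.Int.floordiv (lo + hi) 2
    if PySem.List.pyGetD s mid 0 < x then bsearchLoop s x (mid + 1) hi
    else bsearchLoop s x lo mid
  else lo
termination_by (hi - lo).toNat
decreasing_by
  · have := pv_mid_bounds lo hi h; omega
  · have := pv_mid_bounds lo hi h; omega

def convert_alt (lst : List Int) : String :=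
  let sorted_unique := PySem.List.sorted (PySem.Set.ofList lst) (fun x => x) false
  let out := (PySem.List.pyRange 0 (lst.length : Int) 1).foldl
      (fun acc i =>
        acc ++ [bsearchLoop sorted_unique (PySem.List.pyGetD lst i 0) 0 (sorted_unique.length : Int) + 1]) []
  pyListStr out

-- ===== PRECONDITION & SPEC =====
def Spec_convert (lst : List Int) (out : String) : Prop := out = convert_alt lst
instance (lst : List Int) (out : String) : Decidable (Spec_convert lst out) := by unfold Spec_convert; infer_instance

-- ===== CLAIM (what is proved, stated in full; the proofs are below) =====
def Claim_equal_convert : Prop := ∀ (lst : List Int), Dom_convert lst → Spec_convert lst (convert lst)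

-- ===== LEMMAS AND PROOFS =====

-- strict monotonicity of a Pairwise (<) list, index form
theorem pv_mono {s : List Int} (hs : s.Pairwise (· < ·)) {p q : Nat}
    (hpq : p < q) (hq : q < s.length) : s[p] < s[q] :=
  List.pairwise_iff_getElem.mp hs p q (Nat.lt_trans hpq hq) hq hpq

-- xs[m] for an in-range nonnegative index, getElem form
theorem pv_pyGetD_eq (s : List Int) (m : Int) (h0 : 0 ≤ m) (hlt : m.toNat < s.length) :
    PySem.List.pyGetD s m 0 = s[m.toNat] := by
  rcases Int.eq_ofNat_of_zero_le h0 with ⟨n, rfl⟩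
  have hn : n < s.length := by simpa using hlt
  rw [PySem.List.pyGetD_natCast, List.getD_eq_getElem?_getD]
  simp [List.getElem?_eq_getElem hn]

-- A's dictionary maps s[j] to j+1 when s is strictly increasing
theorem pv_dic_getD (s : List Int) (hs : s.Pairwise (· < ·)) (j : Nat) (hj : j < s.length) :
    ((PySem.List.pyRange 0 (s.length : Int) 1).foldl
      (fun d i => d.insert (PySem.List.pyGetD s i 0) (i + 1)) PySem.Dict.empty).getD s[j] 0
    = (j : Int) + 1 := by
  have hnd : s.Nodup := hs.nodup
  have hmap : (PySem.List.pyRange 0 (s.length : Int) 1).map (fun i => PySem.List.pyGetD s i 0) = s :=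
    PySem.List.map_pyGetD_pyRange_zero' s 0
  have hempty : (PySem.Dict.empty : PySem.Dict Int Int).items = [] := rfl
  have hitems := PySem.Dict.items_foldl_insert_fresh
      (PySem.List.pyRange 0 (s.length : Int) 1)
      (fun i => PySem.List.pyGetD s i 0) (fun i => i + 1) PySem.Dict.empty
      (fun a _ => PySem.Dict.contains_empty _) (by rw [hmap]; exact hnd)
  apply PySem.Dict.getD_of_mem_items
  · rw [hitems, hempty, List.nil_append, List.mem_map]
    refine ⟨(j : Int), PySem.List.mem_pyRange_one.mpr ⟨by omega, by exact_mod_cast hj⟩, ?_⟩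
    show (PySem.List.pyGetD s ((j : Nat) : Int) 0, ((j : Nat) : Int) + 1) = (s[j], (j : Int) + 1)
    rw [pv_pyGetD_eq s (j : Int) (by omega) (by simpa using hj)]
    simp
  · exact PySem.Dict.nodup_keys_foldl_insert_key
      (PySem.List.pyRange 0 (s.length : Int) 1)
      (fun i => PySem.List.pyGetD s i 0) (fun d i => i + 1) PySem.Dict.empty
      PySem.Dict.nodup_keys_empty

-- the binary-search loop finds the index of x in a strictly increasing list containing it
theorem pv_bsearch (s : List Int) (hs : s.Pairwise (· < ·)) (j : Nat) (hj : j < s.length)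
    (x : Int) (hx : s[j] = x) :
    ∀ (n : Nat) (lo hi : Int), (hi - lo).toNat ≤ n → 0 ≤ lo → lo ≤ (j : Int) → (j : Int) ≤ hi →
      hi ≤ (s.length : Int) → bsearchLoop s x lo hi = (j : Int) := by
  intro n
  induction n with
  | zero =>
    intro lo hi hn h0 hlo hhi hlen
    rw [bsearchLoop]
    split_ifs with h <;> omega
  | succ m ih =>
    intro lo hi hn h0 hlo hhi hlen
    rw [bsearchLoop]
    split_ifs with h
    · have hmid := pv_mid_bounds lo hi h
      have hget := pv_pyGetD_eq s (PySem.Int.floordiv (lo + hi) 2) (by omega) (by omega)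
      show (if PySem.List.pyGetD s (PySem.Int.floordiv (lo + hi) 2) 0 < x then
              bsearchLoop s x (PySem.Int.floordiv (lo + hi) 2 + 1) hi
            else bsearchLoop s x lo (PySem.Int.floordiv (lo + hi) 2)) = (j : Int)
      rw [hget]
      by_cases hcmp : s[(PySem.Int.floordiv (lo + hi) 2).toNat] < x
      · -- sorted_unique[mid] < x: recurse on [mid+1, hi)
        rw [if_pos hcmp]
        have hmj : (PySem.Int.floordiv (lo + hi) 2).toNat < j := by
          by_contra hc
          push Not at hc
          rcases Nat.lt_or_ge j (PySem.Int.floordiv (lo + hi) 2).toNat with h' | h'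
          · exact absurd (hx ▸ pv_mono hs h' (by omega)) (by omega)
          · have : j = (PySem.Int.floordiv (lo + hi) 2).toNat := by omega
            subst this; omega
        exact ih (PySem.Int.floordiv (lo + hi) 2 + 1) hi (by omega) (by omega) (by omega) hhi hlen
      · -- x ≤ sorted_unique[mid]: recurse on [lo, mid)
        rw [if_neg hcmp]
        have hjm : j ≤ (PySem.Int.floordiv (lo + hi) 2).toNat := by
          by_contra hc
          push Not at hc
          exact absurd (hx ▸ pv_mono hs hc (by omega)) (by omega)
        exact ih lo (PySem.Int.floordiv (lo + hi) 2) (by omega) h0 hlo (by omega) (by omega)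
    · omega

-- per element of lst, A's dictionary lookup equals B's binary search + 1
theorem pv_elem_eq (lst : List Int) (x : Int) (hx : x ∈ lst) :
    ((PySem.List.pyRange 0 ((PySem.List.sorted (PySem.Set.ofList lst) (fun y => y) false).length : Int) 1).foldl
      (fun d i => d.insert (PySem.List.pyGetD (PySem.List.sorted (PySem.Set.ofList lst) (fun y => y) false) i 0) (i + 1))
      PySem.Dict.empty).getD x 0
    = bsearchLoop (PySem.List.sorted (PySem.Set.ofList lst) (fun y => y) false) x 0
        ((PySem.List.sorted (PySem.Set.ofList lst) (fun y => y) false).length : Int) + 1 := by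
  set s := PySem.List.sorted (PySem.Set.ofList lst) (fun y => y) false with hsdef
  have hs : s.Pairwise (· < ·) := PySem.List.sorted_ofList_pairwise_lt lst
  have hxs : x ∈ s := by
    rw [hsdef, PySem.List.mem_sorted, PySem.Set.mem_ofList]
    exact hx
  obtain ⟨j, hj, hxj⟩ := List.mem_iff_getElem.mp hxs
  subst hxj
  rw [pv_dic_getD s hs j hj,
      pv_bsearch s hs j hj s[j] rfl s.length 0 (s.length : Int)
        (by omega) (by omega) (by omega) (by exact_mod_cast Nat.le_of_lt hj) (by omega)]

-- ===== VERDICT (by name: the statement is the Claim_ definition above) =====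
theorem convert_spec : Claim_equal_convert := by
  intro lst _
  show convert lst = convert_alt lst
  simp only [convert, convert_alt]
  rw [PySem.List.foldl_pyRange_zero_pyGetD' lst 0
        (fun acc x => acc ++ [PySem.Dict.getD
          ((PySem.List.pyRange 0 ((PySem.List.sorted (PySem.Set.ofList lst) (fun y => y) false).length : Int) 1).foldl
            (fun d i => d.insert (PySem.List.pyGetD (PySem.List.sorted (PySem.Set.ofList lst) (fun y => y) false) i 0) (i + 1))
            PySem.Dict.empty) x 0]) [],
      PySem.List.foldl_pyRange_zero_pyGetD' lst 0
        (fun acc x => acc ++ [bsearchLoop (PySem.List.sorted (PySem.Set.ofList lst) (fun y => y) false) x 0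
          ((PySem.List.sorted (PySem.Set.ofList lst) (fun y => y) false).length : Int) + 1]) [],
      PySem.List.foldl_append_singleton_eq_map,
      PySem.List.foldl_append_singleton_eq_map]
  exact congrArg pyListStr (by simpa using List.map_congr_left (fun x hx => pv_elem_eq lst x hx))
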